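-- pv_equiv track=rewrite | github.com/kylin0925/leetcode | 1705_eatenApples_2.py | eatenApples
-- ===== SOURCE A (Python) =====
-- from typing import List
--
-- def eatenApples(apples: List[int], days: List[int]) -> int:
--     import heapq
--     n = len(apples)
--     m = []
--     d = 0
--     i = 0
--     while i < n or len(m) > 0:
--         if i < n :
--             heapq.heappush(m, [i + days[i], apples[i]])
--         if len(m) > 0:
--             h = [0, 0]
--             while len(m):
--                 h = heapq.heappop(m)
--                 if len(h) > 0 and h[1] > 0 and h[0] > i:
--                     break
--             if len(h) > 0 and h[1] > 0 and h[0] > i: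
--                 h[1] -= 1
--                 d += 1
--                 heapq.heappush(m, h)
--
--         i += 1
--     return d
-- ===== SOURCE B (Python) =====
-- def eatenApples(apples, days):
--     n = len(apples)
--     buckets = {}  # expiry day -> remaining apple count
--     eaten = 0
--     i = 0
--     while i < n or buckets:
--         if i < n:
--             e = i + days[i]
--             a = apples[i]
--             if a > 0:
--                 buckets[e] = buckets.get(e, 0) + a
--         best = None
--         for k in list(buckets):
--             if k <= i or buckets[k] <= 0:
--                 del buckets[k]
--             elif best is None or k < best:
--                 best = k
--         if best is not None:
--             buckets[best] -= 1
--             eaten += 1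
--             if buckets[best] == 0:
--                 del buckets[best]
--         i += 1
--     return eaten
-- ===== Notes on version B (the rewrite author's own statement) =====
-- stated objective: alternative
-- what changed: Replaces the heap of [expiry,count] entries (lazy invalidation, pop/push cycle every day) by a dict bucketing the remaining apple count per expiry day, scanned each day to drop expired/empty buckets and eat from the smallest unexpired one.
import Mathlib
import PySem

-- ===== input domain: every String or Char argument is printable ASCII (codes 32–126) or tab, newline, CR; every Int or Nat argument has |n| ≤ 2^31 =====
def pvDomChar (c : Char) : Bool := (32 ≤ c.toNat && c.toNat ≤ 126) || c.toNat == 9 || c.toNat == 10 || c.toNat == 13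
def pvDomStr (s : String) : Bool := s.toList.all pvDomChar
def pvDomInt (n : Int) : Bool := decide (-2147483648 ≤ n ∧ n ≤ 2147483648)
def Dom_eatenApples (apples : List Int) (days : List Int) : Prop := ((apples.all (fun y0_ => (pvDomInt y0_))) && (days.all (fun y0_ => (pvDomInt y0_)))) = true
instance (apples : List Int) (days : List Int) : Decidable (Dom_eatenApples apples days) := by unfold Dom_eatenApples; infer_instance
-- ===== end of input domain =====

-- B replaces A's heap of [expiry, count] entries by a dict bucketing the remaining apples per
-- expiry day, scanned each day for the smallest unexpired bucket (alternative algorithm, not faster).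

-- ===== PORT A =====
-- A's heapq holds two-element lists [expiry, count], compared lexicographically; the heap is
-- modeled exactly by a lexicographically sorted list: heappush = ordered insert, heappop = head
-- (equal elements are interchangeable values, so pop order among ties cannot affect the result).
def hpush : List (Int × Int) → Int × Int → List (Int × Int)
  | [], x => [x]
  | y :: ys, x => if x.1 < y.1 ∨ (x.1 = y.1 ∧ x.2 ≤ y.2) then x :: y :: ys else y :: hpush ys x

-- the inner `h = [0, 0]; while len(m): h = heappop(m); if h[1] > 0 and h[0] > i: break` loop
def popLoop (i : Int) : List (Int × Int) → (Int × Int) × List (Int × Int)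
  | [] => ((0, 0), [])
  | h :: rest => if 0 < h.2 ∧ i < h.1 then (h, rest) else popLoop i rest

-- the `if len(m) > 0:` block: pop until valid, then maybe eat one apple and push the entry back
def stepEat (i : Int) (m1 : List (Int × Int)) (d : Int) : List (Int × Int) × Int :=
  if m1 ≠ [] then
    if 0 < (popLoop i m1).1.2 ∧ i < (popLoop i m1).1.1 then
      (hpush (popLoop i m1).2 ((popLoop i m1).1.1, (popLoop i m1).1.2 - 1), d + 1)
    else ((popLoop i m1).2, d)
  else (m1, d)

-- termination measures for the outer while loops (proof devices, cited by decreasing_by only)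
def muA (m : List (Int × Int)) : Nat := (m.map (fun p => p.2.toNat + 1)).sum
def wApple (apples : List Int) (j : Int) : Nat := (PySem.List.pyGetD apples j 0).toNat + 1
def remA (apples : List Int) (n i : Int) : Nat := ((PySem.List.pyRange i n 1).map (wApple apples)).sum

theorem popLoop_cons (i : Int) (y : Int × Int) (ys : List (Int × Int)) :
    popLoop i (y :: ys) = if 0 < y.2 ∧ i < y.1 then (y, ys) else popLoop i ys := rfl

theorem hpush_perm (m : List (Int × Int)) (x : Int × Int) : (hpush m x).Perm (x :: m) := by
  induction m with
  | nil => simp [hpush]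
  | cons y ys ih =>
    rw [hpush]
    split
    · exact List.Perm.refl _
    · exact (ih.cons y).trans (List.Perm.swap x y ys)

theorem hpush_ne_nil (m : List (Int × Int)) (x : Int × Int) : hpush m x ≠ [] := by
  cases m with
  | nil => simp [hpush]
  | cons y ys => rw [hpush]; split <;> simp

theorem muA_hpush (m : List (Int × Int)) (x : Int × Int) :
    muA (hpush m x) = x.2.toNat + 1 + muA m := by
  unfold muA
  rw [((hpush_perm m x).map (fun p => p.2.toNat + 1)).sum_eq]
  simp

theorem muA_pos (m : List (Int × Int)) (h : m ≠ []) : 0 < muA m := by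
  cases m with
  | nil => simp at h
  | cons y ys => simp [muA]

theorem popLoop_not_valid (i : Int) (m : List (Int × Int))
    (h : ¬(0 < (popLoop i m).1.2 ∧ i < (popLoop i m).1.1)) : (popLoop i m).2 = [] := by
  induction m with
  | nil => rfl
  | cons y ys ih =>
    by_cases hv : 0 < y.2 ∧ i < y.1
    · rw [popLoop_cons, if_pos hv] at h
      exact absurd hv h
    · rw [popLoop_cons, if_neg hv] at h ⊢
      exact ih h

theorem popLoop_valid_decomp (i : Int) (m : List (Int × Int))
    (h : 0 < (popLoop i m).1.2 ∧ i < (popLoop i m).1.1) :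
    ∃ pre, m = pre ++ (popLoop i m).1 :: (popLoop i m).2 ∧
      ∀ z ∈ pre, ¬(0 < z.2 ∧ i < z.1) := by
  induction m with
  | nil => simp [popLoop] at h
  | cons y ys ih =>
    by_cases hv : 0 < y.2 ∧ i < y.1
    · rw [popLoop_cons, if_pos hv]
      exact ⟨[], rfl, by intro z hz; simp at hz⟩
    · rw [popLoop_cons, if_neg hv] at h ⊢
      obtain ⟨pre, hpre, hall⟩ := ih h
      refine ⟨y :: pre, by rw [List.cons_append, ← hpre], ?_⟩
      intro z hz
      rcases List.mem_cons.mp hz with h1 | h2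
      · subst h1; exact hv
      · exact hall z h2

theorem stepEat_mu_lt (i : Int) (m1 : List (Int × Int)) (d : Int) (h1 : m1 ≠ []) :
    muA (stepEat i m1 d).1 < muA m1 := by
  rw [stepEat, if_pos h1]
  split
  · rename_i hv
    obtain ⟨pre, hdec, _⟩ := popLoop_valid_decomp i m1 hv
    set q := (popLoop i m1).1 with hq
    set r := (popLoop i m1).2 with hr
    show muA (hpush r (q.1, q.2 - 1)) < muA m1
    have hsum : muA m1 = muA pre + (q.2.toNat + 1 + muA r) := by
      conv_lhs => rw [hdec]
      simp [muA]
    rw [muA_hpush]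
    have := hv.1
    simp only [] at *
    omega
  · rename_i hv
    rw [popLoop_not_valid i m1 hv]
    simpa [muA] using muA_pos m1 h1

theorem remA_cons (apples : List Int) (n i : Int) (h : i < n) :
    remA apples n i = wApple apples i + remA apples n (i + 1) := by
  unfold remA
  rw [PySem.List.pyRange_one_cons h]
  simp

theorem remA_zero (apples : List Int) (n i : Int) (h : n ≤ i) : remA apples n i = 0 := by
  unfold remA
  rw [PySem.List.pyRange_one_eq_nil h]
  rfl

def loopA (apples days : List Int) (n : Int) (m : List (Int × Int)) (d i : Int) : Int :=
  if i < n ∨ m ≠ [] then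
    let m1 := if i < n then hpush m (i + PySem.List.pyGetD days i 0, PySem.List.pyGetD apples i 0) else m
    loopA apples days n (stepEat i m1 d).1 (stepEat i m1 d).2 (i + 1)
  else d
termination_by remA apples n i + muA m
decreasing_by
  rename_i hg
  split
  · rename_i hi
    have h2 := stepEat_mu_lt i
      (hpush m (i + PySem.List.pyGetD days i 0, PySem.List.pyGetD apples i 0)) d (hpush_ne_nil _ _)
    rw [muA_hpush] at h2
    have h3 := remA_cons apples n i hi
    simp only [wApple] at h3
    omega
  · rename_i hi
    have hm : m ≠ [] := by tauto
    have h2 := stepEat_mu_lt i m d hm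
    have h3 := remA_zero apples n i (by omega)
    have h4 := remA_zero apples n (i + 1) (by omega)
    omega

def eatenApples (apples : List Int) (days : List Int) : Int :=
  loopA apples days (apples.length : Int) [] 0 0

-- ===== PORT B =====
-- buckets is the Python dict expiry-day -> remaining count, an association list in insertion order

-- buckets[e] = buckets.get(e, 0) + a  (update in place, new key appended at the end)
def addB : List (Int × Int) → Int → Int → List (Int × Int)
  | [], e, a => [(e, a)]
  | (k, c) :: rest, e, a => if k = e then (k, c + a) :: rest else (k, c) :: addB rest e a

-- best = k if best is None or k < best else best
def bmin (best : Option Int) (k : Int) : Option Int :=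
  match best with
  | none => some k
  | some b => if k < b then some k else some b

-- the `for k in list(buckets): …` scan: delete stale buckets, track the smallest surviving key
def scanB (i : Int) : List (Int × Int) → Option Int → List (Int × Int) × Option Int
  | [], best => ([], best)
  | (k, c) :: rest, best =>
    if k ≤ i ∨ c ≤ 0 then scanB i rest best
    else ((k, c) :: (scanB i rest (bmin best k)).1, (scanB i rest (bmin best k)).2)

-- buckets[best] -= 1; if buckets[best] == 0: del buckets[best]
def decB : List (Int × Int) → Int → List (Int × Int)
  | [], _ => []
  | (k, c) :: rest, e =>
    if k = e then (if c - 1 = 0 then rest else (k, c - 1) :: rest) else (k, c) :: decB rest e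

-- the `if best is not None:` block
def stepB (i : Int) (bs1 : List (Int × Int)) (eaten : Int) : List (Int × Int) × Int :=
  match (scanB i bs1 none).2 with
  | none => ((scanB i bs1 none).1, eaten)
  | some e => (decB (scanB i bs1 none).1 e, eaten + 1)

theorem scanB_cons (i k c : Int) (rest : List (Int × Int)) (best : Option Int) :
    scanB i ((k, c) :: rest) best =
      if k ≤ i ∨ c ≤ 0 then scanB i rest best
      else ((k, c) :: (scanB i rest (bmin best k)).1, (scanB i rest (bmin best k)).2) := rfl

theorem muA_addB (bs : List (Int × Int)) (e a : Int) (ha : 0 ≤ a) :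
    muA (addB bs e a) ≤ muA bs + (a.toNat + 1) := by
  induction bs with
  | nil => simp [addB, muA]
  | cons p rest ih =>
    obtain ⟨k, c⟩ := p
    rw [addB]
    split
    · simp only [muA, List.map_cons, List.sum_cons] at *
      omega
    · simp only [muA, List.map_cons, List.sum_cons] at *
      omega

theorem addB_ne_nil (bs : List (Int × Int)) (e a : Int) : addB bs e a ≠ [] := by
  cases bs with
  | nil => simp [addB]
  | cons p rest => obtain ⟨k, c⟩ := p; rw [addB]; split <;> simp

theorem scanB_fst (i : Int) (bs : List (Int × Int)) :
    ∀ b, (scanB i bs b).1 = bs.filter (fun p => !(decide (p.1 ≤ i) || decide (p.2 ≤ 0))) := by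
  induction bs with
  | nil => intro b; rfl
  | cons p rest ih =>
    intro b
    obtain ⟨k, c⟩ := p
    rw [scanB_cons, List.filter_cons]
    split
    · rename_i hd
      rw [ih]
      rw [if_neg (by simp; omega)]
    · rename_i hd
      push_neg at hd
      have hf : ((fun p : Int × Int => !(decide (p.1 ≤ i) || decide (p.2 ≤ 0))) (k, c) = true) := by
        simp; omega
      rw [if_pos hf]
      simp only [List.cons.injEq, true_and]
      rw [ih]

theorem scanB_snd_isSome (i : Int) (bs : List (Int × Int)) :
    ∀ b : Option Int, b.isSome → ((scanB i bs b).2).isSome := by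
  induction bs with
  | nil => intro b hb; simpa [scanB] using hb
  | cons p rest ih =>
    intro b hb
    obtain ⟨k, c⟩ := p
    rw [scanB_cons]
    split
    · exact ih b hb
    · apply ih
      cases b with
      | none => simp [bmin]
      | some v => simp [bmin]; split <;> simp

theorem scanB_snd_none (i : Int) (bs : List (Int × Int)) :
    ∀ b, (scanB i bs b).2 = none → b = none ∧ (scanB i bs b).1 = [] := by
  induction bs with
  | nil => intro b hb; exact ⟨hb, rfl⟩
  | cons p rest ih =>
    intro b hb
    obtain ⟨k, c⟩ := p
    rw [scanB_cons] at hb ⊢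
    split
    · rename_i hd
      rw [if_pos hd] at hb  -- keep hb in the same branch shape
      exact ih b hb
    · rename_i hd
      rw [if_neg hd] at hb
      exfalso
      have hs : ((scanB i rest (bmin b k)).2).isSome := by
        apply scanB_snd_isSome
        cases b with
        | none => simp [bmin]
        | some v => simp [bmin]; split <;> simp
      simp only [] at hb
      rw [hb] at hs
      simp at hs

theorem scanB_snd_some (i : Int) (bs : List (Int × Int)) :
    ∀ b e, (scanB i bs b).2 = some e →
      (∀ p ∈ (scanB i bs b).1, e ≤ p.1) ∧
      (b = some e ∨ ∃ c, (e, c) ∈ (scanB i bs b).1) ∧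
      (∀ v, b = some v → e ≤ v) := by
  induction bs with
  | nil =>
    intro b e hb
    simp only [scanB] at hb ⊢
    refine ⟨by simp, Or.inl hb, ?_⟩
    intro v hv
    rw [hv] at hb
    injection hb with h
    omega
  | cons p rest ih =>
    intro b e hb
    obtain ⟨k, c⟩ := p
    rw [scanB_cons] at hb ⊢
    split
    · rename_i hd
      rw [if_pos hd] at hb
      exact ih b e hb
    · rename_i hd
      rw [if_neg hd] at hb
      simp only [] at hb ⊢
      obtain ⟨ih1, ih2, ih3⟩ := ih (bmin b k) e hb
      have hek : e ≤ k := by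
        cases b with
        | none => exact ih3 k (by simp [bmin])
        | some v =>
          by_cases hkv : k < v
          · exact ih3 k (by simp [bmin, hkv])
          · have := ih3 v (by simp [bmin, hkv])
            omega
      refine ⟨?_, ?_, ?_⟩
      · intro q hq
        rcases List.mem_cons.mp hq with h1 | h2
        · subst h1; exact hek
        · exact ih1 q h2
      · rcases ih2 with h1 | ⟨c', hc'⟩
        · cases b with
          | none =>
            have hk : e = k := by simp [bmin] at h1; omega
            subst hk
            exact Or.inr ⟨c, by simp⟩
          | some v =>
            by_cases hkv : k < v
            · have hk : e = k := by simp [bmin, hkv] at h1; omega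
              subst hk
              exact Or.inr ⟨c, by simp⟩
            · have hk : e = v := by simp [bmin, hkv] at h1; omega
              subst hk
              exact Or.inl rfl
        · exact Or.inr ⟨c', by simp [hc']⟩
      · intro v hv
        subst hv
        by_cases hkv : k < v
        · have := ih3 k (by simp [bmin, hkv]); omega
        · exact ih3 v (by simp [bmin, hkv])

theorem muA_filter_le (i : Int) (bs : List (Int × Int)) :
    muA (bs.filter (fun p => !(decide (p.1 ≤ i) || decide (p.2 ≤ 0)))) ≤ muA bs := by
  induction bs with
  | nil => simp [muA]
  | cons p rest ih =>
    simp only [List.filter_cons]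
    split <;> simp only [muA, List.map_cons, List.sum_cons] at * <;> omega

theorem filter_pos (i : Int) (bs : List (Int × Int)) :
    ∀ p ∈ bs.filter (fun p => !(decide (p.1 ≤ i) || decide (p.2 ≤ 0))), i < p.1 ∧ 0 < p.2 := by
  intro p hp
  have h := List.of_mem_filter hp
  simp only [Bool.not_eq_true', Bool.or_eq_false_iff, decide_eq_false_iff_not] at h
  omega

theorem muA_decB_lt (bs : List (Int × Int)) (e : Int)
    (hpos : ∀ p ∈ bs, 0 < p.2) (hmem : ∃ c, (e, c) ∈ bs) :
    muA (decB bs e) < muA bs := by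
  induction bs with
  | nil => simp at hmem
  | cons p rest ih =>
    obtain ⟨k, c⟩ := p
    rw [decB]
    split
    · have hc : 0 < c := hpos (k, c) (by simp)
      split <;> simp only [muA, List.map_cons, List.sum_cons] <;> omega
    · rename_i hk
      obtain ⟨c', hc'⟩ := hmem
      have hc'' : (e, c') ∈ rest := by
        rcases List.mem_cons.mp hc' with h1 | h2
        · exact absurd (congrArg Prod.fst h1.symm) hk
        · exact h2
      have := ih (fun q hq => hpos q (by simp [hq])) ⟨c', hc''⟩
      simp only [muA, List.map_cons, List.sum_cons] at *
      omega

theorem stepB_mu_lt (i : Int) (bs1 : List (Int × Int)) (eaten : Int) (h1 : bs1 ≠ []) :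
    muA (stepB i bs1 eaten).1 < muA bs1 := by
  unfold stepB
  cases hsnd : (scanB i bs1 none).2 with
  | none =>
    have h2 := scanB_snd_none i bs1 none hsnd
    simp only [h2.2]
    have h0 := muA_pos bs1 h1
    simp only [muA] at h0
    simp only [muA, List.map_nil, List.sum_nil]
    exact h0
  | some e =>
    simp only []
    obtain ⟨_, h2, _⟩ := scanB_snd_some i bs1 none e hsnd
    rcases h2 with h2 | ⟨c, hc⟩
    · simp at h2
    · have hfst := scanB_fst i bs1 none
      have hpos : ∀ p ∈ (scanB i bs1 none).1, 0 < p.2 := by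
        intro p hp
        rw [hfst] at hp
        exact (filter_pos i bs1 p hp).2
      calc muA (decB (scanB i bs1 none).1 e) < muA (scanB i bs1 none).1 :=
              muA_decB_lt _ e hpos ⟨c, hc⟩
        _ ≤ muA bs1 := by rw [hfst]; exact muA_filter_le i bs1

def loopB (apples days : List Int) (n : Int) (bs : List (Int × Int)) (eaten i : Int) : Int :=
  if i < n ∨ bs ≠ [] then
    let bs1 := if i < n then
        (if 0 < PySem.List.pyGetD apples i 0 then
          addB bs (i + PySem.List.pyGetD days i 0) (PySem.List.pyGetD apples i 0) else bs)
      else bs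
    loopB apples days n (stepB i bs1 eaten).1 (stepB i bs1 eaten).2 (i + 1)
  else eaten
termination_by remA apples n i + muA bs
decreasing_by
  rename_i hg
  split
  · rename_i hi
    have h3 := remA_cons apples n i hi
    simp only [wApple] at h3
    split
    · rename_i ha
      have h2 := stepB_mu_lt i
        (addB bs (i + PySem.List.pyGetD days i 0) (PySem.List.pyGetD apples i 0)) eaten
        (addB_ne_nil _ _ _)
      have h4 := muA_addB bs (i + PySem.List.pyGetD days i 0) (PySem.List.pyGetD apples i 0)
        (by omega)
      omega
    · rename_i ha
      by_cases hb : bs = []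
      · subst hb
        have hs : stepB i ([] : List (Int × Int)) eaten = ([], eaten) := rfl
        rw [hs]
        simp only [muA, List.map_nil, List.sum_nil]
        omega
      · have h2 := stepB_mu_lt i bs eaten hb
        omega
  · rename_i hi
    have hbs : bs ≠ [] := by tauto
    have h2 := stepB_mu_lt i bs eaten hbs
    have h3 := remA_zero apples n i (by omega)
    have h4 := remA_zero apples n (i + 1) (by omega)
    omega

def eatenApples_alt (apples : List Int) (days : List Int) : Int :=
  loopB apples days (apples.length : Int) [] 0 0

-- ===== PRECONDITION & SPEC =====
-- Pre_ excludes exactly the inputs on which Python A raises IndexError: days shorter than apples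
-- (A reads days[i] for every i < len(apples)); B raises the same IndexError there.
def Pre_eatenApples (apples : List Int) (days : List Int) : Prop := apples.length ≤ days.length
instance (apples : List Int) (days : List Int) : Decidable (Pre_eatenApples apples days) := by
  unfold Pre_eatenApples; infer_instance

def pvWitness_eatenApples : List Int × List Int := ([2, 1], [3, 2])

def Spec_eatenApples (apples : List Int) (days : List Int) (out : Int) : Prop := out = eatenApples_alt apples days
instance (apples : List Int) (days : List Int) (out : Int) : Decidable (Spec_eatenApples apples days out) := by unfold Spec_eatenApples; infer_instance

-- ===== CLAIM (what is proved, stated in full; the proofs are below) =====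
def Claim_equal_eatenApples : Prop := ∀ (apples : List Int) (days : List Int), Dom_eatenApples apples days → Pre_eatenApples apples days → Spec_eatenApples apples days (eatenApples apples days)

-- ===== LEMMAS AND PROOFS =====

-- the heap is sorted by expiry
def msort (m : List (Int × Int)) : Prop := List.Pairwise (fun a b : Int × Int => a.1 ≤ b.1) m

-- contribution of one heap entry to the total valid (positive count, unexpired) apples at expiry e
def aggT (i e : Int) (p : Int × Int) : Int := if p.1 = e ∧ i < p.1 ∧ 0 < p.2 then p.2 else 0
-- total valid apples at expiry e in A's heap
def agg (i : Int) (m : List (Int × Int)) (e : Int) : Int := (m.map (aggT i e)).sum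
-- total count stored in B's buckets at key e
def bgetT (e : Int) (p : Int × Int) : Int := if p.1 = e then p.2 else 0
def bget (bs : List (Int × Int)) (e : Int) : Int := (bs.map (bgetT e)).sum

theorem mem_hpush (m : List (Int × Int)) (x q : Int × Int) :
    q ∈ hpush m x ↔ q = x ∨ q ∈ m := by
  rw [(hpush_perm m x).mem_iff]
  simp

theorem msort_hpush (m : List (Int × Int)) (x : Int × Int) (h : msort m) :
    msort (hpush m x) := by
  induction m with
  | nil => simp [hpush, msort]
  | cons y ys ih =>
    rw [msort, List.pairwise_cons] at h
    rw [hpush]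
    split
    · rename_i hle
      rw [msort, List.pairwise_cons]
      constructor
      · intro q hq
        rcases List.mem_cons.mp hq with h1 | h2
        · subst h1; omega
        · have := h.1 q h2; omega
      · rw [msort] at *; exact List.pairwise_cons.mpr h
    · rename_i hle
      push_neg at hle
      rw [msort, List.pairwise_cons]
      constructor
      · intro q hq
        rcases (mem_hpush ys x q).mp hq with h1 | h2
        · subst h1; omega
        · exact h.1 q h2
      · exact ih h.2

theorem agg_hpush (i : Int) (m : List (Int × Int)) (x : Int × Int) (e : Int) :
    agg i (hpush m x) e = aggT i e x + agg i m e := by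
  unfold agg
  rw [((hpush_perm m x).map (aggT i e)).sum_eq]
  simp

theorem agg_zero_of_all_invalid (i e : Int) (m : List (Int × Int))
    (h : ∀ p ∈ m, ¬(0 < p.2 ∧ i < p.1)) : agg i m e = 0 := by
  induction m with
  | nil => rfl
  | cons p rest ih =>
    have h1 : aggT i e p = 0 := by
      unfold aggT
      have := h p (by simp)
      split <;> [omega; rfl]
    simp only [agg, List.map_cons, List.sum_cons] at *
    rw [h1, ih (fun q hq => h q (by simp [hq]))]
    ring

theorem agg_nonneg (i e : Int) (m : List (Int × Int)) : 0 ≤ agg i m e := by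
  induction m with
  | nil => simp [agg]
  | cons p rest ih =>
    have h1 : 0 ≤ aggT i e p := by unfold aggT; split <;> omega
    simp only [agg, List.map_cons, List.sum_cons] at *
    omega

theorem agg_pos_of_mem (i e : Int) (m : List (Int × Int)) (p : Int × Int)
    (hp : p ∈ m) (h1 : p.1 = e) (h2 : 0 < p.2) (h3 : i < p.1) : 0 < agg i m e := by
  obtain ⟨s, t, rfl⟩ := List.append_of_mem hp
  have ha := agg_nonneg i e s
  have hb := agg_nonneg i e t
  have hterm : aggT i e p = p.2 := by unfold aggT; rw [if_pos ⟨h1, h3, h2⟩]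
  simp only [agg, List.map_append, List.sum_append, List.map_cons, List.sum_cons] at *
  omega

theorem agg_exists_of_pos (i e : Int) (m : List (Int × Int)) (h : 0 < agg i m e) :
    ∃ p ∈ m, p.1 = e ∧ 0 < p.2 ∧ i < p.1 := by
  induction m with
  | nil => simp [agg] at h
  | cons p rest ih =>
    by_cases hc : p.1 = e ∧ i < p.1 ∧ 0 < p.2
    · exact ⟨p, by simp, hc.1, hc.2.2, hc.2.1⟩
    · have h1 : aggT i e p = 0 := by unfold aggT; rw [if_neg hc]
      simp only [agg, List.map_cons, List.sum_cons, h1, zero_add] at h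
      obtain ⟨q, hq, hrest⟩ := ih h
      exact ⟨q, by simp [hq], hrest⟩

theorem agg_shift (i e : Int) (m : List (Int × Int)) (h : i + 1 < e) :
    agg (i + 1) m e = agg i m e := by
  induction m with
  | nil => rfl
  | cons p rest ih =>
    have h1 : aggT (i + 1) e p = aggT i e p := by
      unfold aggT; split_ifs <;> omega
    simp only [agg, List.map_cons, List.sum_cons] at *
    omega

theorem agg_zero_of_le (i e : Int) (m : List (Int × Int)) (h : e ≤ i) : agg i m e = 0 := by
  induction m with
  | nil => rfl
  | cons p rest ih =>
    have h1 : aggT i e p = 0 := by unfold aggT; split_ifs <;> omega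
    simp only [agg, List.map_cons, List.sum_cons] at *
    omega

theorem bget_addB (bs : List (Int × Int)) (e a : Int) :
    ∀ e', bget (addB bs e a) e' = bget bs e' + (if e' = e then a else 0) := by
  induction bs with
  | nil =>
    intro e'
    simp only [addB, bget, bgetT, List.map_cons, List.map_nil, List.sum_cons, List.sum_nil]
    split_ifs <;> omega
  | cons p rest ih =>
    intro e'
    obtain ⟨k, c⟩ := p
    rw [addB]
    split
    · rename_i hk
      subst hk
      simp only [bget, bgetT, List.map_cons, List.sum_cons]
      split_ifs <;> omega
    · simp only [bget, bgetT, List.map_cons, List.sum_cons] at *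
      rw [ih e']
      ring

theorem mem_keys_addB (bs : List (Int × Int)) (e a x : Int) :
    x ∈ (addB bs e a).map Prod.fst ↔ x ∈ bs.map Prod.fst ∨ x = e := by
  induction bs with
  | nil => simp [addB]
  | cons p rest ih =>
    obtain ⟨k, c⟩ := p
    rw [addB]
    split
    · rename_i hk
      subst hk
      simp only [List.map_cons, List.mem_cons]
      tauto
    · simp only [List.map_cons, List.mem_cons, ih]
      tauto

theorem nodup_keys_addB (bs : List (Int × Int)) (e a : Int)
    (h : (bs.map Prod.fst).Nodup) : ((addB bs e a).map Prod.fst).Nodup := by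
  induction bs with
  | nil => simp [addB]
  | cons p rest ih =>
    obtain ⟨k, c⟩ := p
    simp only [List.map_cons, List.nodup_cons] at h
    rw [addB]
    split
    · rename_i hk
      subst hk
      simp only [List.map_cons, List.nodup_cons]
      exact h
    · rename_i hk
      simp only [List.map_cons, List.nodup_cons]
      constructor
      · intro hmem
        rcases (mem_keys_addB rest e a k).mp hmem with h1 | h1
        · exact h.1 h1
        · exact hk h1
      · exact ih h.2

theorem pos_addB (bs : List (Int × Int)) (e a : Int) (ha : 0 < a)
    (h : ∀ p ∈ bs, 0 < p.2) : ∀ p ∈ addB bs e a, 0 < p.2 := by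
  induction bs with
  | nil => intro p hp; simp [addB] at hp; subst hp; exact ha
  | cons q rest ih =>
    obtain ⟨k, c⟩ := q
    intro p hp
    rw [addB] at hp
    split at hp
    · rcases List.mem_cons.mp hp with h1 | h1
      · subst h1
        have := h (k, c) (by simp)
        simp at this ⊢
        omega
      · exact h p (by simp [h1])
    · rcases List.mem_cons.mp hp with h1 | h1
      · subst h1; exact h (k, c) (by simp)
      · exact ih (fun q hq => h q (by simp [hq])) p h1

theorem bget_zero_of_not_key (bs : List (Int × Int)) (e : Int)
    (h : e ∉ bs.map Prod.fst) : bget bs e = 0 := by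
  induction bs with
  | nil => rfl
  | cons p rest ih =>
    simp only [List.map_cons, List.mem_cons] at h
    push_neg at h
    have h1 : bgetT e p = 0 := by unfold bgetT; rw [if_neg (fun hc : p.1 = e => absurd hc.symm h.1)]
    simp only [bget, List.map_cons, List.sum_cons] at *
    rw [h1, ih h.2]
    ring

theorem bget_of_mem_nodup (bs : List (Int × Int)) (e c : Int)
    (hnd : (bs.map Prod.fst).Nodup) (hmem : (e, c) ∈ bs) : bget bs e = c := by
  induction bs with
  | nil => simp at hmem
  | cons p rest ih =>
    obtain ⟨k, c'⟩ := p
    simp only [List.map_cons, List.nodup_cons] at hnd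
    rcases List.mem_cons.mp hmem with h1 | h1
    · injection h1 with h1a h1b
      subst h1a; subst h1b
      have h0 : bget rest e = 0 := bget_zero_of_not_key rest e hnd.1
      simp only [bget, bgetT, List.map_cons, List.sum_cons] at h0 ⊢
      simp [h0]
    · have hke : k ≠ e := by
        intro hk
        subst hk
        exact hnd.1 (List.mem_map.mpr ⟨(k, c), h1, rfl⟩)
      have h2 : bgetT e (k, c') = 0 := by unfold bgetT; rw [if_neg hke]
      simp only [bget, List.map_cons, List.sum_cons] at *
      rw [h2, ih hnd.2 h1]
      ring

theorem keys_decB_sublist (bs : List (Int × Int)) (e : Int) :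
    ((decB bs e).map Prod.fst).Sublist (bs.map Prod.fst) := by
  induction bs with
  | nil => simp [decB]
  | cons p rest ih =>
    obtain ⟨k, c⟩ := p
    rw [decB]
    split
    · split
      · simp only [List.map_cons]
        exact (List.sublist_cons_self k (rest.map Prod.fst))
      · simp only [List.map_cons]
        exact List.Sublist.cons₂ k (List.Sublist.refl _)
    · simp only [List.map_cons]
      exact List.Sublist.cons₂ k ih

theorem pos_decB (bs : List (Int × Int)) (e : Int)
    (h : ∀ p ∈ bs, 0 < p.2) : ∀ p ∈ decB bs e, 0 < p.2 := by
  induction bs with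
  | nil => simp [decB]
  | cons q rest ih =>
    obtain ⟨k, c⟩ := q
    intro p hp
    rw [decB] at hp
    split at hp
    · split at hp
      · exact h p (by simp [hp])
      · rename_i hc1
        rcases List.mem_cons.mp hp with h1 | h1
        · subst h1
          have := h (k, c) (by simp)
          simp at this ⊢
          omega
        · exact h p (by simp [h1])
    · rcases List.mem_cons.mp hp with h1 | h1
      · subst h1; exact h (k, c) (by simp)
      · exact ih (fun q hq => h q (by simp [hq])) p h1

theorem bget_decB (bs : List (Int × Int)) (e : Int)
    (hnd : (bs.map Prod.fst).Nodup) (hmem : ∃ c0, (e, c0) ∈ bs) :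
    ∀ e', bget (decB bs e) e' = bget bs e' - (if e' = e then 1 else 0) := by
  induction bs with
  | nil => simp at hmem
  | cons p rest ih =>
    intro e'
    obtain ⟨k, c⟩ := p
    simp only [List.map_cons, List.nodup_cons] at hnd
    rw [decB]
    by_cases hk : k = e
    · subst hk
      rw [if_pos rfl]
      have hrest : bget rest k = 0 := bget_zero_of_not_key rest k hnd.1
      split
      · by_cases he' : e' = k
        · subst he'
          simp only [bget, bgetT, List.map_cons, List.sum_cons] at hrest ⊢
          split_ifs <;> omega
        · simp only [bget, bgetT, List.map_cons, List.sum_cons] at hrest ⊢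
          split_ifs <;> omega
      · by_cases he' : e' = k
        · subst he'
          simp only [bget, bgetT, List.map_cons, List.sum_cons] at hrest ⊢
          split_ifs <;> omega
        · simp only [bget, bgetT, List.map_cons, List.sum_cons] at hrest ⊢
          split_ifs <;> omega
    · rw [if_neg hk]
      obtain ⟨c0, hc0⟩ := hmem
      have hc0' : (e, c0) ∈ rest := by
        rcases List.mem_cons.mp hc0 with h1 | h1
        · exact absurd (congrArg Prod.fst h1.symm) hk
        · exact h1
      have hrec := ih hnd.2 ⟨c0, hc0'⟩ e'
      simp only [bget, bgetT, List.map_cons, List.sum_cons] at hrec ⊢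
      split_ifs at hrec ⊢ <;> omega

theorem bget_filter_eq (i e : Int) (bs : List (Int × Int))
    (hpos : ∀ p ∈ bs, 0 < p.2) (he : i < e) :
    bget (bs.filter (fun p => !(decide (p.1 ≤ i) || decide (p.2 ≤ 0)))) e = bget bs e := by
  induction bs with
  | nil => rfl
  | cons p rest ih =>
    have hprest := fun q hq => hpos q (List.mem_cons_of_mem p hq)
    have ih' := ih hprest
    simp only [bget] at ih'
    simp only [List.filter_cons]
    split
    · simp only [bget, List.map_cons, List.sum_cons]
      rw [ih']
    · rename_i hd
      have hp := hpos p (by simp)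
      simp only [Bool.not_eq_true', Bool.or_eq_false_iff, decide_eq_false_iff_not] at hd
      push_neg at hd
      have h1 : bgetT e p = 0 := by
        unfold bgetT
        rw [if_neg]
        intro hc
        omega
      simp only [bget, List.map_cons, List.sum_cons]
      rw [h1, ih']
      omega

-- if some valid entry exists, the inner pop loop finds one
theorem popLoop_finds (i : Int) (m : List (Int × Int))
    (h : ∃ q ∈ m, 0 < q.2 ∧ i < q.1) :
    0 < (popLoop i m).1.2 ∧ i < (popLoop i m).1.1 := by
  induction m with
  | nil => simp at h
  | cons y ys ih =>
    by_cases hv : 0 < y.2 ∧ i < y.1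
    · rw [popLoop_cons, if_pos hv]; exact hv
    · rw [popLoop_cons, if_neg hv]
      apply ih
      obtain ⟨q, hq, hqv⟩ := h
      rcases List.mem_cons.mp hq with h1 | h1
      · subst h1; exact absurd hqv hv
      · exact ⟨q, h1, hqv⟩

-- dead-tail lemmas: once nothing edible is left, each loop finishes without eating
theorem loopA_dead (apples days : List Int) (n : Int) (m : List (Int × Int)) (d i : Int)
    (hin : n ≤ i) (hinv : ∀ q ∈ m, ¬(0 < q.2 ∧ i < q.1)) :
    loopA apples days n m d i = d := by
  by_cases hm : m = []
  · subst hm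
    rw [loopA, if_neg (by simp; omega)]
  · rw [loopA, if_pos (Or.inr hm)]
    have hnv : ¬(0 < (popLoop i m).1.2 ∧ i < (popLoop i m).1.1) := by
      intro hv
      obtain ⟨pre, hdec, _⟩ := popLoop_valid_decomp i m hv
      apply hinv (popLoop i m).1 _ hv
      conv_lhs => rw [hdec]
      exact List.mem_append_right _ (List.mem_cons_self ..)
    have hse : stepEat i m d = ([], d) := by
      rw [stepEat, if_pos hm, if_neg hnv, popLoop_not_valid i m hnv]
    split
    · rename_i hi; omega
    · show loopA apples days n (stepEat i m d).1 (stepEat i m d).2 (i + 1) = d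
      rw [hse]
      show loopA apples days n [] d (i + 1) = d
      rw [loopA, if_neg (by simp; omega)]

theorem scanB_none_of_filter_nil (i : Int) (bs : List (Int × Int))
    (h : (scanB i bs none).1 = []) : (scanB i bs none).2 = none := by
  cases hs : (scanB i bs none).2 with
  | none => rfl
  | some e =>
    obtain ⟨_, h2, _⟩ := scanB_snd_some i bs none e hs
    rcases h2 with h2 | ⟨c, hc⟩
    · simp at h2
    · rw [h] at hc; simp at hc

theorem loopB_dead (apples days : List Int) (n : Int) (bs : List (Int × Int)) (d i : Int)
    (hin : n ≤ i) (hkeys : ∀ p ∈ bs, p.1 ≤ i) :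
    loopB apples days n bs d i = d := by
  by_cases hb : bs = []
  · subst hb
    rw [loopB, if_neg (by simp; omega)]
  · rw [loopB, if_pos (Or.inr hb)]
    have hf : (scanB i bs none).1 = [] := by
      rw [scanB_fst]
      apply List.filter_eq_nil_iff.mpr
      intro p hp
      simp only [Bool.not_eq_true', Bool.or_eq_false_iff, decide_eq_false_iff_not]
      intro hcon
      exact absurd (hkeys p hp) hcon.1
    have hs : stepB i bs d = ([], d) := by
      rw [stepB]
      rw [scanB_none_of_filter_nil i bs hf, hf]
    split
    · rename_i hi; omega
    · show loopB apples days n (stepB i bs d).1 (stepB i bs d).2 (i + 1) = d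
      rw [hs]
      show loopB apples days n [] d (i + 1) = d
      rw [loopB, if_neg (by simp; omega)]

-- one-step unfolding of the loops under their guard
theorem loopA_step (apples days : List Int) (n : Int) (m : List (Int × Int)) (d i : Int)
    (hg : i < n ∨ m ≠ []) :
    loopA apples days n m d i =
      loopA apples days n
        (stepEat i (if i < n then
          hpush m (i + PySem.List.pyGetD days i 0, PySem.List.pyGetD apples i 0) else m) d).1
        (stepEat i (if i < n then
          hpush m (i + PySem.List.pyGetD days i 0, PySem.List.pyGetD apples i 0) else m) d).2
        (i + 1) := by
  rw [loopA, if_pos hg]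

theorem loopB_step (apples days : List Int) (n : Int) (bs : List (Int × Int)) (d i : Int)
    (hg : i < n ∨ bs ≠ []) :
    loopB apples days n bs d i =
      loopB apples days n
        (stepB i (if i < n then
          (if 0 < PySem.List.pyGetD apples i 0 then
            addB bs (i + PySem.List.pyGetD days i 0) (PySem.List.pyGetD apples i 0) else bs)
          else bs) d).1
        (stepB i (if i < n then
          (if 0 < PySem.List.pyGetD apples i 0 then
            addB bs (i + PySem.List.pyGetD days i 0) (PySem.List.pyGetD apples i 0) else bs)
          else bs) d).2
        (i + 1) := by
  rw [loopB, if_pos hg]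

-- one simultaneous iteration of the two eating phases preserves the simulation invariant
theorem step_sim (i : Int) (m1 bs1 : List (Int × Int)) (d : Int)
    (hm1 : m1 ≠ [])
    (hsort : msort m1) (hnd : (bs1.map Prod.fst).Nodup) (hpos : ∀ p ∈ bs1, 0 < p.2)
    (hagg : ∀ e, agg i m1 e = if i < e then bget bs1 e else 0) :
    (stepEat i m1 d).2 = (stepB i bs1 d).2 ∧
    msort (stepEat i m1 d).1 ∧ (((stepB i bs1 d).1.map Prod.fst)).Nodup ∧
    (∀ p ∈ (stepB i bs1 d).1, 0 < p.2) ∧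
    (∀ e, agg (i + 1) (stepEat i m1 d).1 e =
      if i + 1 < e then bget (stepB i bs1 d).1 e else 0) := by
  by_cases hv : 0 < (popLoop i m1).1.2 ∧ i < (popLoop i m1).1.1
  · -- an edible entry exists: both sides eat one apple at the same expiry
    set q := (popLoop i m1).1 with hqdef
    set r := (popLoop i m1).2 with hrdef
    obtain ⟨pre, hdec, hpre⟩ := popLoop_valid_decomp i m1 hv
    have hseA : stepEat i m1 d = (hpush r (q.1, q.2 - 1), d + 1) := by
      rw [stepEat, if_pos hm1, if_pos hv]
    have haggm1 : ∀ e, agg i m1 e = (if q.1 = e then q.2 else 0) + agg i r e := by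
      intro e
      conv_lhs => rw [hdec]
      simp only [agg, List.map_append, List.sum_append, List.map_cons, List.sum_cons]
      have hzero : agg i pre e = 0 := agg_zero_of_all_invalid i e pre hpre
      simp only [agg] at hzero
      have hq2 : aggT i e q = if q.1 = e then q.2 else 0 := by
        unfold aggT; split_ifs <;> omega
      rw [hzero, hq2]
      ring
    have hmemq : q ∈ m1 := by
      conv_lhs => rw [hdec]
      exact List.mem_append_right _ (List.mem_cons_self ..)
    have haggq : 0 < agg i m1 q.1 := agg_pos_of_mem i q.1 m1 q hmemq rfl hv.1 hv.2
    have hbq : 0 < bget bs1 q.1 := by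
      have h := hagg q.1
      rw [if_pos hv.2] at h
      omega
    have hkey : ∃ c0, (q.1, c0) ∈ bs1 := by
      by_contra hno
      push_neg at hno
      have hnk : q.1 ∉ bs1.map Prod.fst := by
        intro hmem
        obtain ⟨p, hp, hpe⟩ := List.mem_map.mp hmem
        exact hno p.2 (by rw [← hpe]; exact hp)
      have := bget_zero_of_not_key bs1 q.1 hnk
      omega
    obtain ⟨c0, hc0⟩ := hkey
    have hc0pos : 0 < c0 := by
      have := bget_of_mem_nodup bs1 q.1 c0 hnd hc0
      omega
    have hc0mem : (q.1, c0) ∈ (scanB i bs1 none).1 := by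
      rw [scanB_fst]
      refine List.mem_filter.mpr ⟨hc0, ?_⟩
      simp
      constructor <;> [exact hv.2; omega]
    have hnd1 : (((scanB i bs1 none).1).map Prod.fst).Nodup := by
      rw [scanB_fst]
      exact List.Nodup.sublist (List.Sublist.map _ List.filter_sublist) hnd
    have hpos1 : ∀ p ∈ (scanB i bs1 none).1, 0 < p.2 := by
      intro p hp
      rw [scanB_fst] at hp
      exact (filter_pos i bs1 p hp).2
    cases hbest : (scanB i bs1 none).2 with
    | none =>
      exfalso
      have := (scanB_snd_none i bs1 none hbest).2
      rw [this] at hc0mem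
      simp at hc0mem
    | some e0 =>
      obtain ⟨hub, hmemE, _⟩ := scanB_snd_some i bs1 none e0 hbest
      rcases hmemE with hE | ⟨c1, hc1⟩
      · simp at hE
      · have hc1f : i < e0 ∧ 0 < c1 := by
          have h := hc1
          rw [scanB_fst] at h
          exact filter_pos i bs1 (e0, c1) h
        have hc1bs : (e0, c1) ∈ bs1 := by
          have h := hc1
          rw [scanB_fst] at h
          exact List.mem_of_mem_filter h
        have hagge0 : 0 < agg i m1 e0 := by
          have hb := bget_of_mem_nodup bs1 e0 c1 hnd hc1bs
          have h := hagg e0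
          rw [if_pos hc1f.1] at h
          omega
        obtain ⟨p0, hp0, hp0e, hp0c, hp0i⟩ := agg_exists_of_pos i e0 m1 hagge0
        have hmin : q.1 ≤ p0.1 := by
          have hp0' : p0 ∈ pre ++ q :: r := by rw [← hdec]; exact hp0
          rcases List.mem_append.mp hp0' with h | h
          · exact absurd ⟨hp0c, hp0i⟩ (hpre p0 h)
          · rcases List.mem_cons.mp h with h | h
            · rw [h]
            · have hs2 : msort (q :: r) := by
                have hsub : (q :: r).Sublist m1 := by
                  rw [hdec]
                  exact List.sublist_append_right _ _
                exact List.Pairwise.sublist hsub hsort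
              rw [msort, List.pairwise_cons] at hs2
              exact hs2.1 p0 h
        have hle1 : e0 ≤ q.1 := hub (q.1, c0) hc0mem
        have he0q : e0 = q.1 := by omega
        subst he0q
        have hseB : stepB i bs1 d = (decB (scanB i bs1 none).1 q.1, d + 1) := by
          rw [stepB, hbest]
        have hA1 : (stepEat i m1 d).1 = hpush r (q.1, q.2 - 1) := by rw [hseA]
        have hA2 : (stepEat i m1 d).2 = d + 1 := by rw [hseA]
        have hB1 : (stepB i bs1 d).1 = decB (scanB i bs1 none).1 q.1 := by rw [hseB]
        have hB2 : (stepB i bs1 d).2 = d + 1 := by rw [hseB]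
        have hrsort : msort r := by
          have hsub : r.Sublist m1 := by
            rw [hdec]
            exact (List.sublist_cons_self q r).trans (List.sublist_append_right _ _)
          exact List.Pairwise.sublist hsub hsort
        refine ⟨by rw [hA2, hB2], ?_, ?_, ?_, ?_⟩
        · rw [hA1]
          exact msort_hpush r (q.1, q.2 - 1) hrsort
        · rw [hB1]
          exact List.Nodup.sublist (keys_decB_sublist _ _) hnd1
        · rw [hB1]
          exact pos_decB _ _ hpos1
        · intro e
          rw [hA1, hB1]
          by_cases hle : i + 1 < e
          · rw [if_pos hle]
            have h1 := haggm1 e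
            have h2 := hagg e
            rw [if_pos (by omega)] at h2
            have h3 := bget_decB (scanB i bs1 none).1 q.1 hnd1 ⟨c0, hc0mem⟩ e
            have h4 : bget (scanB i bs1 none).1 e = bget bs1 e := by
              rw [scanB_fst]
              exact bget_filter_eq i e bs1 hpos (by omega)
            have h5 : agg (i + 1) (hpush r (q.1, q.2 - 1)) e =
                aggT i e (q.1, q.2 - 1) + agg i r e := by
              rw [agg_shift i e _ hle, agg_hpush]
            rw [h5, h3, h4]
            by_cases hqe : q.1 = e
            · subst hqe
              have h6 : aggT i q.1 (q.1, q.2 - 1) = q.2 - 1 := by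
                unfold aggT; split_ifs <;> omega
              rw [if_pos rfl] at h1
              rw [h6, if_pos rfl]
              omega
            · have h6 : aggT i e (q.1, q.2 - 1) = 0 := by
                unfold aggT; split_ifs <;> omega
              rw [h6, if_neg (fun h => hqe h.symm)]
              rw [if_neg hqe] at h1
              omega
          · rw [if_neg hle]
            exact agg_zero_of_le (i + 1) e _ (by omega)
  · -- nothing edible: A pops the whole heap, B clears all buckets; neither eats
    have hrnil : (popLoop i m1).2 = [] := popLoop_not_valid i m1 hv
    have hseA : stepEat i m1 d = ([], d) := by
      rw [stepEat, if_pos hm1, if_neg hv, hrnil]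
    have hnoval : ∀ z ∈ m1, ¬(0 < z.2 ∧ i < z.1) := by
      intro z hz hzv
      exact hv (popLoop_finds i m1 ⟨z, hz, hzv⟩)
    have hfnil : (scanB i bs1 none).1 = [] := by
      rw [scanB_fst]
      apply List.filter_eq_nil_iff.mpr
      intro p hp
      simp only [Bool.not_eq_true', Bool.or_eq_false_iff, decide_eq_false_iff_not]
      intro hcon
      have hb : bget bs1 p.1 = p.2 :=
        bget_of_mem_nodup bs1 p.1 p.2 hnd (by rw [← Prod.mk.eta (p := p)] at hp; exact hp)
      have h2 := hagg p.1
      rw [if_pos (show i < p.1 by omega)] at h2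
      obtain ⟨z, hz, hze, hzc, hzi⟩ := agg_exists_of_pos i p.1 m1 (by
        have := hpos p hp
        omega)
      exact hnoval z hz ⟨hzc, hzi⟩
    have hbnone : (scanB i bs1 none).2 = none := scanB_none_of_filter_nil i bs1 hfnil
    have hseB : stepB i bs1 d = ([], d) := by
      rw [stepB, hbnone, hfnil]
    rw [hseA, hseB]
    refine ⟨rfl, List.Pairwise.nil, by simp, by simp, ?_⟩
    intro e
    simp only [agg, bget, List.map_nil, List.sum_nil]
    split <;> rfl

-- the main simulation: from related states the two loops compute the same total
theorem simAB (apples days : List Int) (n : Int) :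
    ∀ N (m bs : List (Int × Int)) (d i : Int),
    remA apples n i + muA m ≤ N →
    msort m → (bs.map Prod.fst).Nodup → (∀ p ∈ bs, 0 < p.2) →
    (∀ e, agg i m e = if i < e then bget bs e else 0) →
    loopA apples days n m d i = loopB apples days n bs d i := by
  intro N
  induction N using Nat.strong_induction_on with
  | _ N ih =>
    intro m bs d i hN hsort hnd hpos hagg
    by_cases hg : i < n ∨ m ≠ []
    · by_cases hgB : i < n ∨ bs ≠ []
      · rw [loopA_step apples days n m d i hg, loopB_step apples days n bs d i hgB]
        by_cases hi : i < n
        · rw [if_pos hi, if_pos hi]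
          set D := PySem.List.pyGetD days i 0 with hD
          set a := PySem.List.pyGetD apples i 0 with ha
          set m1 := hpush m (i + D, a) with hm1def
          set bs1 := (if 0 < a then addB bs (i + D) a else bs) with hbs1def
          have hm1ne : m1 ≠ [] := hpush_ne_nil _ _
          have hsort1 : msort m1 := msort_hpush _ _ hsort
          have hnd1 : (bs1.map Prod.fst).Nodup := by
            rw [hbs1def]
            split
            · exact nodup_keys_addB bs _ _ hnd
            · exact hnd
          have hpos1 : ∀ p ∈ bs1, 0 < p.2 := by
            rw [hbs1def]
            split
            · rename_i hap; exact pos_addB bs _ _ hap hpos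
            · exact hpos
          have hagg1 : ∀ e, agg i m1 e = if i < e then bget bs1 e else 0 := by
            intro e
            have h2 := hagg e
            have hT : aggT i e (i + D, a) = if i + D = e ∧ i < i + D ∧ 0 < a then a else 0 := rfl
            rw [hm1def, agg_hpush, hbs1def, hT]
            by_cases hap : 0 < a
            · rw [if_pos hap, bget_addB bs (i + D) a e]
              split_ifs at h2 ⊢ <;> omega
            · rw [if_neg hap]
              split_ifs at h2 ⊢ <;> omega
          have hstep := step_sim i m1 bs1 d hm1ne hsort1 hnd1 hpos1 hagg1
          rw [← hstep.1]
          refine ih (remA apples n (i + 1) + muA (stepEat i m1 d).1) ?_ _ _ _ _ (le_refl _)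
            hstep.2.1 hstep.2.2.1 hstep.2.2.2.1 hstep.2.2.2.2
          have hlt := stepEat_mu_lt i m1 d hm1ne
          have h5 : muA m1 = a.toNat + 1 + muA m := by rw [hm1def, muA_hpush]
          have h3 := remA_cons apples n i hi
          simp only [wApple] at h3
          rw [← ha] at h3
          omega
        · rw [if_neg hi, if_neg hi]
          have hm : m ≠ [] := by tauto
          have hstep := step_sim i m bs d hm hsort hnd hpos hagg
          rw [← hstep.1]
          refine ih (remA apples n (i + 1) + muA (stepEat i m d).1) ?_ _ _ _ _ (le_refl _)
            hstep.2.1 hstep.2.2.1 hstep.2.2.2.1 hstep.2.2.2.2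
          have hlt := stepEat_mu_lt i m d hm
          have h3 := remA_zero apples n i (by omega)
          have h4 := remA_zero apples n (i + 1) (by omega)
          omega
      · have hbs : bs = [] := by tauto
        have hni : ¬ i < n := by tauto
        rw [loopB, if_neg hgB]
        apply loopA_dead apples days n m d i (by omega)
        intro z hz hzv
        have h2 := hagg z.1
        rw [if_pos hzv.2, hbs] at h2
        simp only [bget, List.map_nil, List.sum_nil] at h2
        have := agg_pos_of_mem i z.1 m z hz rfl hzv.1 hzv.2
        omega
    · have hm : m = [] := by tauto
      have hni : ¬ i < n := by tauto
      rw [loopA, if_neg hg]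
      refine (loopB_dead apples days n bs d i (by omega) ?_).symm
      intro p hp
      by_contra hgt
      push_neg at hgt
      have hb : bget bs p.1 = p.2 :=
        bget_of_mem_nodup bs p.1 p.2 hnd (by rw [← Prod.mk.eta (p := p)] at hp; exact hp)
      have h2 := hagg p.1
      rw [if_pos hgt, hm] at h2
      simp only [agg, List.map_nil, List.sum_nil] at h2
      have := hpos p hp
      omega

-- ===== VERDICT (by name: the statement is the Claim_ definition above) =====
theorem eatenApples_spec : Claim_equal_eatenApples := by
  intro apples days _ _
  unfold Spec_eatenApples eatenApples eatenApples_alt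
  apply simAB apples days (apples.length : Int) (remA apples (apples.length : Int) 0 + muA []) [] [] 0 0
  · exact le_refl _
  · exact List.Pairwise.nil
  · simp
  · simp
  · intro e
    simp [agg, bget]
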